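-- pv_equiv track=rewrite | github.com/hydrays/NewMathAnalysis | build/build.py | add_numbering
-- ===== SOURCE A (Python) =====
-- def add_numbering(content: str, chapter_num: str) -> str:
--     sec = sub = subsub = 0
--     out = []
--     for line in content.split("\n"):
--         if line.startswith("# "):
--             sec = sub = subsub = 0
--             out.append(f"# 第{chapter_num}章 {line[2:].strip()}")
--         elif line.startswith("## "):
--             sec += 1; sub = subsub = 0
--             out.append(f"## {chapter_num}.{sec} {line[3:].strip()}")
--         elif line.startswith("### "):
--             sub += 1; subsub = 0
--             out.append(f"### {chapter_num}.{sec}.{sub} {line[4:].strip()}")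
--         elif line.startswith("#### "):
--             subsub += 1
--             out.append(f"#### {chapter_num}.{sec}.{sub}.{subsub} {line[5:].strip()}")
--         else:
--             out.append(line)
--     return "\n".join(out)
-- ===== SOURCE B (Python) =====
-- def _level(line):
--     n = 0
--     for ch in line:
--         if ch != "#":
--             return n
--         n += 1
--     return n
--
-- def add_numbering(content: str, chapter_num: str) -> str:
--     counts = [0, 0, 0, 0, 0]
--     out = []
--     for line in content.split("\n"):
--         level = _level(line)
--         if 1 <= level <= 4 and line[level:level + 1] == " ":
--             counts[level] += 1
--             for i in range(level + 1, 5):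
--                 counts[i] = 0
--             text = line[level + 1:].strip()
--             if level == 1:
--                 out.append("# 第" + chapter_num + "章 " + text)
--             else:
--                 nums = ".".join([chapter_num] + [str(counts[i]) for i in range(2, level + 1)])
--                 out.append("#" * level + " " + nums + " " + text)
--         else:
--             out.append(line)
--     return "\n".join(out)
-- ===== Notes on version B (the rewrite author's own statement) =====
-- stated objective: simpler
-- what changed: Replaces A's four hard-coded startswith branches and three named counters by a computed header level (count of leading '#' followed by a space) driving one indexed counts list whose deeper entries are zeroed and whose slice renders the dotted number.
import Mathlib
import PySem

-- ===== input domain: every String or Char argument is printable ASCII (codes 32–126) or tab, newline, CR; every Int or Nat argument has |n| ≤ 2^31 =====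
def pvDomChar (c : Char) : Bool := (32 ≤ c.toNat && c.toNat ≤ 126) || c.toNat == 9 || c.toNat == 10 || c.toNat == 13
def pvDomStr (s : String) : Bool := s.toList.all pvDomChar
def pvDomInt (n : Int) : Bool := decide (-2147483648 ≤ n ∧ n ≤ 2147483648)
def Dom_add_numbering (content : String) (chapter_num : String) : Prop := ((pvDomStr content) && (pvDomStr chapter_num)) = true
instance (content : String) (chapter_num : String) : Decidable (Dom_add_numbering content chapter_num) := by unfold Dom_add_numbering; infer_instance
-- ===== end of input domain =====

-- B replaces A's four hard-coded branches and three named counters by a computed header level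
-- and an indexed counts list (objective: simpler/alternative; same cost).

-- ===== PORT A =====
-- one branch dispatch of A's loop body: returns (new (sec,sub,subsub), rendered line)
def stepA (ch : List Char) (s : Int × Int × Int) (line : List Char) :
    (Int × Int × Int) × List Char :=
  let (sec, sub, subsub) := s
  if PySem.Chars.startswith line ['#', ' '] then
    ((0, 0, 0),
      ['#', ' ', '第'] ++ ch ++ ['章', ' '] ++
        PySem.Chars.strip (PySem.List.slice line (some 2) none))
  else if PySem.Chars.startswith line ['#', '#', ' '] then
    ((sec + 1, 0, 0),
      ['#', '#', ' '] ++ ch ++ ['.'] ++ PySem.Int.toChars (sec + 1) ++ [' '] ++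
        PySem.Chars.strip (PySem.List.slice line (some 3) none))
  else if PySem.Chars.startswith line ['#', '#', '#', ' '] then
    ((sec, sub + 1, 0),
      ['#', '#', '#', ' '] ++ ch ++ ['.'] ++ PySem.Int.toChars sec ++ ['.'] ++
        PySem.Int.toChars (sub + 1) ++ [' '] ++
        PySem.Chars.strip (PySem.List.slice line (some 4) none))
  else if PySem.Chars.startswith line ['#', '#', '#', '#', ' '] then
    ((sec, sub, subsub + 1),
      ['#', '#', '#', '#', ' '] ++ ch ++ ['.'] ++ PySem.Int.toChars sec ++ ['.'] ++
        PySem.Int.toChars sub ++ ['.'] ++ PySem.Int.toChars (subsub + 1) ++ [' '] ++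
        PySem.Chars.strip (PySem.List.slice line (some 5) none))
  else
    ((sec, sub, subsub), line)

def add_numbering (content : String) (chapter_num : String) : String :=
  let lines := PySem.Chars.splitOn content.toList ['\n']
  let r := lines.foldl
    (fun (st : (Int × Int × Int) × List (List Char)) (line : List Char) =>
      let (s', l) := stepA chapter_num.toList st.1 line
      (s', st.2 ++ [l])) ((0, 0, 0), [])
  String.ofList (PySem.Chars.join ['\n'] r.2)

-- ===== PORT B =====
-- port of Source B's _level: count of leading '#' characters
def levelOf : List Char → Nat
  | [] => 0
  | c :: rest => if c ≠ '#' then 0 else levelOf rest + 1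

-- one iteration of Source B's loop body: returns (new counts, rendered line)
def stepB (ch : List Char) (counts : List Int) (line : List Char) :
    List Int × List Char :=
  let level := levelOf line
  if 1 ≤ level ∧ level ≤ 4 ∧
      PySem.List.slice line (some (level : Int)) (some ((level : Int) + 1)) = [' '] then
    let counts1 := counts.set level (counts.getD level 0 + 1)
    let counts2 := (PySem.List.pyRange (level + 1) 5 1).foldl
      (fun cs i => cs.set i.toNat 0) counts1
    let text := PySem.Chars.strip (PySem.List.slice line (some ((level : Int) + 1)) none)
    if level = 1 then
      (counts2, ['#', ' ', '第'] ++ ch ++ ['章', ' '] ++ text)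
    else
      let nums := PySem.Chars.join ['.']
        (ch :: (PySem.List.pyRange 2 ((level : Int) + 1) 1).map
          (fun i => PySem.Int.toChars (counts2.getD i.toNat 0)))
      (counts2, List.replicate level '#' ++ [' '] ++ nums ++ [' '] ++ text)
  else
    (counts, line)

def add_numbering_alt (content : String) (chapter_num : String) : String :=
  let lines := PySem.Chars.splitOn content.toList ['\n']
  let r := lines.foldl
    (fun (st : List Int × List (List Char)) (line : List Char) =>
      let (c', l) := stepB chapter_num.toList st.1 line
      (c', st.2 ++ [l])) (([0, 0, 0, 0, 0] : List Int), [])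
  String.ofList (PySem.Chars.join ['\n'] r.2)

-- ===== PRECONDITION & SPEC =====
def Spec_add_numbering (content : String) (chapter_num : String) (out : String) : Prop := out = add_numbering_alt content chapter_num
instance (content : String) (chapter_num : String) (out : String) : Decidable (Spec_add_numbering content chapter_num out) := by unfold Spec_add_numbering; infer_instance

-- ===== CLAIM (what is proved, stated in full; the proofs are below) =====
def Claim_equal_add_numbering : Prop := ∀ (content : String) (chapter_num : String), Dom_add_numbering content chapter_num → Spec_add_numbering content chapter_num (add_numbering content chapter_num)

-- ===== LEMMAS AND PROOFS =====

-- per-line correspondence: with counts = [0, c1, sec, sub, subsub], B's step renders the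
-- same line as A's step and the new counts again have this shape.

-- slice helpers on Int-literal bounds (proof-side only)
theorem pvSlf2 (r : List Char) : PySem.List.slice r (some (2:Int)) none = r.drop 2 := by
  rw [show (2:Int) = ((2:Nat):Int) from by norm_num]; exact PySem.List.slice_from_natCast r 2
theorem pvSlf3 (r : List Char) : PySem.List.slice r (some (3:Int)) none = r.drop 3 := by
  rw [show (3:Int) = ((3:Nat):Int) from by norm_num]; exact PySem.List.slice_from_natCast r 3
theorem pvSlf4 (r : List Char) : PySem.List.slice r (some (4:Int)) none = r.drop 4 := by
  rw [show (4:Int) = ((4:Nat):Int) from by norm_num]; exact PySem.List.slice_from_natCast r 4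
theorem pvSlf5 (r : List Char) : PySem.List.slice r (some (5:Int)) none = r.drop 5 := by
  rw [show (5:Int) = ((5:Nat):Int) from by norm_num]; exact PySem.List.slice_from_natCast r 5
theorem pvSlc12 (r : List Char) : PySem.List.slice r (some (1:Int)) (some (2:Int)) = (r.drop 1).take 1 := by
  have := PySem.List.slice_natCast_add r 1 1; norm_num at this; simpa using this
theorem pvSlc23 (r : List Char) : PySem.List.slice r (some (2:Int)) (some (3:Int)) = (r.drop 2).take 1 := by
  have := PySem.List.slice_natCast_add r 2 1; norm_num at this; simpa using this
theorem pvSlc34 (r : List Char) : PySem.List.slice r (some (3:Int)) (some (4:Int)) = (r.drop 3).take 1 := by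
  have := PySem.List.slice_natCast_add r 3 1; norm_num at this; simpa using this
theorem pvSlc45 (r : List Char) : PySem.List.slice r (some (4:Int)) (some (5:Int)) = (r.drop 4).take 1 := by
  have := PySem.List.slice_natCast_add r 4 1; norm_num at this; simpa using this
theorem pvR25 : PySem.List.pyRange 2 5 1 = [2,3,4] := by decide
theorem pvR35 : PySem.List.pyRange 3 5 1 = [3,4] := by decide
theorem pvR45 : PySem.List.pyRange 4 5 1 = [4] := by decide
theorem pvR23 : PySem.List.pyRange 2 3 1 = [2] := by decide
theorem pvR24 : PySem.List.pyRange 2 4 1 = [2,3] := by decide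

theorem step_corr (ch line : List Char) (sec sub subsub c1 : Int) :
    ∃ c1', stepB ch [0, c1, sec, sub, subsub] line =
      ([0, c1', (stepA ch (sec, sub, subsub) line).1.1,
        (stepA ch (sec, sub, subsub) line).1.2.1,
        (stepA ch (sec, sub, subsub) line).1.2.2],
       (stepA ch (sec, sub, subsub) line).2) := by
  rcases line with _ | ⟨a, t1⟩
  · exact ⟨c1, by simp [stepA, stepB, levelOf, PySem.Chars.startswith, List.isPrefixOf]⟩
  by_cases ha : a = '#'
  case neg =>
    exact ⟨c1, by simp [stepA, stepB, levelOf, PySem.Chars.startswith, List.isPrefixOf, ha, Ne.symm ha]⟩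
  subst ha
  rcases t1 with _ | ⟨b, t2⟩
  · exact ⟨c1, by simp [stepA, stepB, levelOf, PySem.Chars.startswith, List.isPrefixOf, pvSlc12]⟩
  by_cases hb : b = '#'
  case neg =>
    by_cases hbs : b = ' '
    · subst hbs
      exact ⟨c1 + 1, by
        simp [stepA, stepB, levelOf, PySem.Chars.startswith, List.isPrefixOf,
          pvSlc12, pvSlf2, pvR25, List.set, List.getD]⟩
    · exact ⟨c1, by simp [stepA, stepB, levelOf, PySem.Chars.startswith, List.isPrefixOf,
        pvSlc12, hb, Ne.symm hb, hbs, Ne.symm hbs]⟩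
  subst hb
  rcases t2 with _ | ⟨c, t3⟩
  · exact ⟨c1, by simp [stepA, stepB, levelOf, PySem.Chars.startswith, List.isPrefixOf, pvSlc23]⟩
  by_cases hc : c = '#'
  case neg =>
    by_cases hcs : c = ' '
    · subst hcs
      exact ⟨c1, by
        simp [stepA, stepB, levelOf, PySem.Chars.startswith, List.isPrefixOf,
          pvSlc23, pvSlf3, pvR35, pvR23, List.set, List.getD,
          PySem.Chars.join, List.intercalate, List.intersperse]⟩
    · exact ⟨c1, by simp [stepA, stepB, levelOf, PySem.Chars.startswith, List.isPrefixOf,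
        pvSlc23, hc, Ne.symm hc, hcs, Ne.symm hcs]⟩
  subst hc
  rcases t3 with _ | ⟨d, t4⟩
  · exact ⟨c1, by simp [stepA, stepB, levelOf, PySem.Chars.startswith, List.isPrefixOf, pvSlc34]⟩
  by_cases hd : d = '#'
  case neg =>
    by_cases hds : d = ' '
    · subst hds
      exact ⟨c1, by
        simp [stepA, stepB, levelOf, PySem.Chars.startswith, List.isPrefixOf,
          pvSlc34, pvSlf4, pvR45, pvR24, List.set, List.getD,
          PySem.Chars.join, List.intercalate, List.intersperse]⟩
    · exact ⟨c1, by simp [stepA, stepB, levelOf, PySem.Chars.startswith, List.isPrefixOf,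
        pvSlc34, hd, Ne.symm hd, hds, Ne.symm hds]⟩
  subst hd
  rcases t4 with _ | ⟨e, t5⟩
  · exact ⟨c1, by simp [stepA, stepB, levelOf, PySem.Chars.startswith, List.isPrefixOf, pvSlc45]⟩
  by_cases he : e = '#'
  case neg =>
    by_cases hes : e = ' '
    · subst hes
      exact ⟨c1, by
        simp [stepA, stepB, levelOf, PySem.Chars.startswith, List.isPrefixOf,
          pvSlc45, pvSlf5, pvR25, List.set, List.getD,
          PySem.Chars.join, List.intercalate, List.intersperse]⟩
    · exact ⟨c1, by simp [stepA, stepB, levelOf, PySem.Chars.startswith, List.isPrefixOf,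
        pvSlc45, he, hes, Ne.symm hes]⟩
  subst he
  refine ⟨c1, ?_⟩
  have hlev : levelOf ('#'::'#'::'#'::'#'::'#'::t5) = levelOf t5 + 5 := by
    simp [levelOf]
  simp only [stepB, hlev]
  rw [if_neg (by omega)]
  simp [stepA, PySem.Chars.startswith, List.isPrefixOf]

theorem fold_corr (ch : List Char) (lines : List (List Char))
    (sec sub subsub c1 : Int) (out : List (List Char)) :
    (lines.foldl
      (fun (st : List Int × List (List Char)) (line : List Char) =>
        let (c', l) := stepB ch st.1 line
        (c', st.2 ++ [l])) ([0, c1, sec, sub, subsub], out)).2 =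
    (lines.foldl
      (fun (st : (Int × Int × Int) × List (List Char)) (line : List Char) =>
        let (s', l) := stepA ch st.1 line
        (s', st.2 ++ [l])) ((sec, sub, subsub), out)).2 := by
  induction lines generalizing sec sub subsub c1 out with
  | nil => rfl
  | cons line rest ih =>
    obtain ⟨c1', h⟩ := step_corr ch line sec sub subsub c1
    simp only [List.foldl_cons, h]
    exact ih ..

-- ===== VERDICT (by name: the statement is the Claim_ definition above) =====
theorem add_numbering_spec : Claim_equal_add_numbering := by
  intro content chapter_num _
  show add_numbering content chapter_num = add_numbering_alt content chapter_num
  simp only [add_numbering, add_numbering_alt]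
  rw [fold_corr]
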